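-- pv_equiv track=rewrite | github.com/Itsmemaybe/lab_1 | lab_3/task_2.py | find_common_participants
-- ===== SOURCE A (Python) =====
-- def find_common_participants(first, second, spl=','):
--     result = []
--     for participant1 in first.split(spl):
--         for participant2 in second.split(spl):
--             if participant2 == participant1:
--                 result.append(participant1)
--     result.sort()
--     return result
-- ===== SOURCE B (Python) =====
-- def find_common_participants(first, second, spl=','):
--     # Count second's tokens once, then emit each of first's tokens (taken in
--     # sorted order) as many times as it occurs in second: already sorted output.
--     cnt = {}
--     for t in second.split(spl):
--         cnt[t] = cnt.get(t, 0) + 1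
--     out = []
--     for t in sorted(first.split(spl)):
--         out += [t] * cnt.get(t, 0)
--     return out
-- ===== Notes on version B (the rewrite author's own statement) =====
-- stated objective: faster
-- what changed: Replaces the quadratic nested scan plus final sort of the whole multiset by a one-pass counting dict over second's tokens followed by a single pass over first's sorted tokens emitting count-many copies, so no inner scan and no sort of the (possibly n*m-sized) result.
import Mathlib
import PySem

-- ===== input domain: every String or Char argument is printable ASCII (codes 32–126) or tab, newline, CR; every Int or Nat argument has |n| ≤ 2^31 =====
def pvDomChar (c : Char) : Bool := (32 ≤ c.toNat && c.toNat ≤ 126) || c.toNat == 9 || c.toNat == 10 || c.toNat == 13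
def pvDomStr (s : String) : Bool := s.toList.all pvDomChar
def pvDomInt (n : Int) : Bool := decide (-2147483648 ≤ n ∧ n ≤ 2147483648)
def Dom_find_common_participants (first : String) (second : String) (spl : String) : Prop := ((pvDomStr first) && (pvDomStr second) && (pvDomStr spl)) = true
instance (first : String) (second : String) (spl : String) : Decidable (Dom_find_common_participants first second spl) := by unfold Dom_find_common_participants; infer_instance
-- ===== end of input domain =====

-- B counts second's tokens in a dict and walks first's tokens in sorted order, emitting
-- count-many copies; faster: no inner scan over second and no final sort of the result.

-- ===== PORT A =====
def find_common_participants (first : String) (second : String) (spl : String) : List String :=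
  match PySem.Str.split? first spl, PySem.Str.split? second spl with
  | some l1, some l2 =>
      PySem.List.sorted
        (l1.foldl (fun result p1 =>
          l2.foldl (fun result p2 => if p2 == p1 then result ++ [p1] else result) result) [])
        (fun x => x) false
  | _, _ => []

-- ===== PORT B =====
def find_common_participants_alt (first : String) (second : String) (spl : String) : List String :=
  match PySem.Str.split? second spl with
  | none => []
  | some l2 =>
    match PySem.Str.split? first spl with
    | none => []
    | some l1 =>
      let cnt : PySem.Dict String Int :=
        l2.foldl (fun (d : PySem.Dict String Int) t => d.insert t (d.getD t 0 + 1)) PySem.Dict.empty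
      (PySem.List.sorted l1 (fun x => x) false).foldl
        (fun out t => out ++ List.replicate (cnt.getD t 0).toNat t) []

-- ===== PRECONDITION & SPEC =====
-- Python's str.split raises ValueError on an empty separator, so spl = "" is excluded.
def Pre_find_common_participants (first : String) (second : String) (spl : String) : Prop := spl ≠ ""
instance (first : String) (second : String) (spl : String) : Decidable (Pre_find_common_participants first second spl) := by unfold Pre_find_common_participants; infer_instance
def pvWitness_find_common_participants : String × String × String := ("bob,ann,bob", "ann,bob,cid", ",")

def Spec_find_common_participants (first : String) (second : String) (spl : String) (out : List String) : Prop := out = find_common_participants_alt first second spl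
instance (first : String) (second : String) (spl : String) (out : List String) : Decidable (Spec_find_common_participants first second spl out) := by unfold Spec_find_common_participants; infer_instance

-- ===== CLAIM (what is proved, stated in full; the proofs are below) =====
def Claim_equal_find_common_participants : Prop := ∀ (first : String) (second : String) (spl : String), Dom_find_common_participants first second spl → Pre_find_common_participants first second spl → Spec_find_common_participants first second spl (find_common_participants first second spl)

-- ===== LEMMAS AND PROOFS =====

-- str.split with a non-empty separator never raises (split? is some).
theorem pv_split?_ne_none (s sep : String) (h : sep ≠ "") : PySem.Str.split? s sep ≠ none := by
  simp only [PySem.Str.split?, PySem.Chars.split?]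
  have : sep.toList.isEmpty = false := by
    cases hl : sep.toList with
    | nil => exact absurd (by cases sep with | _ l => simpa using congrArg String.ofList hl) h
    | cons a t => simp
  simp [this]

-- A's inner loop over l2 appends p1 once per match, i.e. count-many copies of p1.
theorem pv_inner_loop (l2 : List String) (p1 : String) (acc : List String) :
    l2.foldl (fun result p2 => if p2 == p1 then result ++ [p1] else result) acc
      = acc ++ List.replicate (l2.count p1) p1 := by
  rw [PySem.List.foldl_append_if (· == p1) (fun _ => p1) l2 acc, List.filter_beq,
    List.map_replicate]

-- Emitting replicate-chunks along a ≤-sorted list yields a ≤-sorted list.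
theorem pv_flatMap_replicate_pairwise (n : String → Nat) :
    ∀ (l : List String), l.Pairwise (· ≤ ·) →
      (l.flatMap (fun t => List.replicate (n t) t)).Pairwise (· ≤ ·) := by
  intro l
  induction l with
  | nil => intro _; simp
  | cons x xs ih =>
    intro h
    rw [List.pairwise_cons] at h
    rw [List.flatMap_cons, List.pairwise_append]
    refine ⟨List.pairwise_replicate.mpr (Or.inr le_rfl), ih h.2, ?_⟩
    intro a ha b hb
    rcases List.mem_flatMap.mp hb with ⟨t, ht, hbt⟩
    rw [List.eq_of_mem_replicate ha, List.eq_of_mem_replicate hbt]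
    exact h.1 t ht

-- ===== VERDICT (by name: the statement is the Claim_ definition above) =====
theorem find_common_participants_spec : Claim_equal_find_common_participants := by
  intro first second spl _ hpre
  unfold Spec_find_common_participants find_common_participants find_common_participants_alt
  cases h1 : PySem.Str.split? first spl with
  | none => exact absurd (pv_split?_ne_none first spl hpre h1) id
  | some l1 =>
    cases h2 : PySem.Str.split? second spl with
    | none => exact absurd (pv_split?_ne_none second spl hpre h2) id
    | some l2 =>
      simp only
      -- rewrite both loops into flatMap of replicate-chunks
      have hA : l1.foldl (fun result p1 =>
            l2.foldl (fun result p2 => if p2 == p1 then result ++ [p1] else result) result) []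
          = l1.flatMap (fun t => List.replicate (l2.count t) t) := by
        have : ∀ acc, l1.foldl (fun result p1 =>
              l2.foldl (fun result p2 => if p2 == p1 then result ++ [p1] else result) result) acc
            = l1.foldl (fun acc t => acc ++ List.replicate (l2.count t) t) acc := by
          intro acc
          apply PySem.List.foldl_congr_mem
          intro a x _
          exact pv_inner_loop l2 x a
        rw [this [], PySem.List.foldl_append_eq_flatMap, List.nil_append]
      have hB : (PySem.List.sorted l1 (fun x => x) false).foldl
            (fun out t => out ++ List.replicate
              (((l2.foldl (fun (d : PySem.Dict String Int) t => d.insert t (d.getD t 0 + 1)) PySem.Dict.empty).getD t 0)).toNat t) []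
          = (PySem.List.sorted l1 (fun x => x) false).flatMap (fun t => List.replicate (l2.count t) t) := by
        rw [PySem.Dict.foldl_insert_getD_add_one_eq_counter]
        have : ∀ t : String, ((PySem.Dict.counter l2).getD t 0).toNat = l2.count t := by
          intro t; rw [PySem.Dict.getD_counter]; exact Int.toNat_natCast _
        simp only [this]
        rw [PySem.List.foldl_append_eq_flatMap, List.nil_append]
      rw [hA, hB]
      apply PySem.List.sorted_id_eq_of_perm_of_pairwise
      · exact List.Perm.flatMap (PySem.List.sorted_perm l1 (fun x => x) false)
          (fun a _ => List.Perm.refl _)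
      · exact pv_flatMap_replicate_pairwise _ _
          (by simpa using PySem.List.sorted_pairwise l1 (fun x => x))
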